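-- pv_equiv track=rewrite | github.com/airstandley/AdventofCode | 2019/Python/Day_4/password_cracker.py | check_password_is_valid
-- ===== SOURCE A (Python) =====
-- def check_password_is_valid(password):
--     """
--     Checks if a password is valid
--     :param str -> password: a six digit (numbers only) string
--     :return: bool
--     """
--     if len(password) != 6:
--         return False
--
--     doubles = set()
--     voided_doubles = set()
--     memory = [-1, -1]  # Now we have to track the last two digits
--     for digit in password:
--         try:
--             digit = int(digit)
--         except ValueError as e:
--             return False  # Only numbers are allowed
--         if digit == memory[0]:
--             if digit == memory[1]:
--                 # If we there are three or more in a row it can't count for the double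
--                 voided_doubles.add(digit)
--             else:
--                 # It's a valid double
--                 doubles.add(digit)
--         elif digit < memory[0]:
--             return False  # Decreasing from the last digit is not allowed
--         memory[1] = memory[0]
--         memory[0] = digit
--     if not (doubles - voided_doubles):
--         return False  # At least one double digit is required.
--     return True
-- ===== SOURCE B (Python) =====
-- def check_password_is_valid(password):
--     """
--     Checks if a password is valid
--     :param str -> password: a six digit (numbers only) string
--     :return: bool
--     """
--     if len(password) != 6:
--         return False
--     digits = []
--     for ch in password:
--         try:
--             digits.append(int(ch))
--         except ValueError:
--             return False  # Only numbers are allowed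
--     if any(a > b for a, b in zip(digits, digits[1:])):
--         return False  # Decreasing is not allowed
--     # Run-length encode the digit string; valid iff some run has length exactly 2
--     runs = []
--     rest = digits
--     while rest:
--         head, n, rest = rest[0], 1, rest[1:]
--         while rest and rest[0] == head:
--             n += 1
--             rest = rest[1:]
--         runs.append((head, n))
--     return any(n == 2 for _, n in runs)
-- ===== Notes on version B (the rewrite author's own statement) =====
-- stated objective: idiomatic
-- what changed: A's single scan that tracks the last two digits and accumulates two sets of digit values is replaced by the standard decomposition: parse all digits, check non-decreasing via adjacent pairs, run-length encode and ask for a run of length exactly 2.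
import Mathlib
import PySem

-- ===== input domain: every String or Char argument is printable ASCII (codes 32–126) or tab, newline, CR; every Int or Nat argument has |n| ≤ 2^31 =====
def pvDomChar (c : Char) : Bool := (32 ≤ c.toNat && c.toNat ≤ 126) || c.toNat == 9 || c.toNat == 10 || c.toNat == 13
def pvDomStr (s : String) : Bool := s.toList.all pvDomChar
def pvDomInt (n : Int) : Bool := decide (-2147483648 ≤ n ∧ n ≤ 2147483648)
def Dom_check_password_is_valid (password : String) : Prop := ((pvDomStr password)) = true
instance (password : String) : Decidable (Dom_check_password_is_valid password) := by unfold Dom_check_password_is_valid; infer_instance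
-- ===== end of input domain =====

-- B replaces A's two-digit-memory scan with doubles/voided sets by the standard decomposition
-- (parse digits, non-decreasing check, run-length encoding with a run of length exactly 2); objective: idiomatic, same cost.

-- ===== PORT A =====
-- the for-loop of A over the password's characters, with its state (doubles, voided_doubles, memory[0], memory[1])
def pvALoop : List Char → PySem.Set Int → PySem.Set Int → Int → Int → Bool
  | [], doubles, voided, _, _ => !(PySem.Set.diff doubles voided).isEmpty
  | c :: cs, doubles, voided, m0, m1 =>
    match PySem.Int.ofChars? [c] with
    | none => false
    | some d =>
      if d = m0 then
        (if d = m1 then pvALoop cs doubles (PySem.Set.add voided d) d m0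
         else pvALoop cs (PySem.Set.add doubles d) voided d m0)
      else if d < m0 then false
      else pvALoop cs doubles voided d m0

def check_password_is_valid (password : String) : Bool :=
  if PySem.Str.len password ≠ 6 then false
  else pvALoop password.toList PySem.Set.empty PySem.Set.empty (-1) (-1)

-- ===== PORT B =====
-- the digit-collecting loop of B (None = some int() raised ValueError)
def pvParseDigits : List Char → Option (List Int)
  | [] => some []
  | c :: cs =>
    match PySem.Int.ofChars? [c] with
    | none => none
    | some d =>
      match pvParseDigits cs with
      | none => none
      | some ds => some (d :: ds)

-- B's inner while loop: extend the current run of `h` (length so far `n`) through `rest`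
def pvTakeRun (h : Int) (n : Nat) : List Int → Nat × List Int
  | [] => (n, [])
  | r :: rs => if r = h then pvTakeRun h (n + 1) rs else (n, r :: rs)

lemma pvTakeRun_snd_length (h : Int) : ∀ (rs : List Int) (n : Nat), (pvTakeRun h n rs).2.length ≤ rs.length := by
  intro rs
  induction rs with
  | nil => intro n; simp [pvTakeRun]
  | cons r rs ih =>
    intro n
    by_cases hr : r = h
    · simp only [pvTakeRun, if_pos hr]
      exact le_trans (ih (n + 1)) (by simp)
    · simp [pvTakeRun, if_neg hr]

-- B's outer while loop: run-length encode
def pvRuns : List Int → List (Int × Nat)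
  | [] => []
  | d :: ds =>
    match hm : pvTakeRun d 1 ds with
    | (n, rest) => (d, n) :: pvRuns rest
  termination_by l => l.length
  decreasing_by
    have := pvTakeRun_snd_length d ds 1
    rw [hm] at this
    simpa using Nat.lt_succ_of_le this

def check_password_is_valid_alt (password : String) : Bool :=
  if PySem.Str.len password ≠ 6 then false
  else
    match pvParseDigits password.toList with
    | none => false
    | some digits =>
      if (digits.zip digits.tail).any (fun p => decide (p.2 < p.1)) then false
      else (pvRuns digits).any (fun r => r.2 == 2)

-- ===== PRECONDITION & SPEC =====
def Spec_check_password_is_valid (password : String) (out : Bool) : Prop := out = check_password_is_valid_alt password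
instance (password : String) (out : Bool) : Decidable (Spec_check_password_is_valid password out) := by unfold Spec_check_password_is_valid; infer_instance

-- ===== CLAIM (what is proved, stated in full; the proofs are below) =====
def Claim_equal_check_password_is_valid : Prop := ∀ (password : String), Dom_check_password_is_valid password → Spec_check_password_is_valid password (check_password_is_valid password)

-- ===== LEMMAS AND PROOFS =====

-- A's loop specialised to the already-parsed digit values
def pvDLoop : List Int → PySem.Set Int → PySem.Set Int → Int → Int → Bool
  | [], doubles, voided, _, _ => !(PySem.Set.diff doubles voided).isEmpty
  | d :: ds, doubles, voided, m0, m1 =>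
    if d = m0 then
      (if d = m1 then pvDLoop ds doubles (PySem.Set.add voided d) d m0
       else pvDLoop ds (PySem.Set.add doubles d) voided d m0)
    else if d < m0 then false
    else pvDLoop ds doubles voided d m0

-- the common streaming specification: found = a finished run of length exactly 2 exists,
-- cat = length of the current run of v, capped at 3
def pvT : List Int → Bool → Nat → Int → Bool
  | [], found, cat, _ => found || decide (cat = 2)
  | d :: ds, found, cat, v =>
    if d = v then pvT ds found (min (cat + 1) 3) v
    else if d < v then false
    else pvT ds (found || decide (cat = 2)) 1 d

def pvND : Int → List Int → Bool
  | _, [] => true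
  | v, d :: ds => decide (v ≤ d) && pvND d ds

def pvLead (v : Int) (ds : List Int) : Nat := (ds.takeWhile (fun x => x == v)).length

def pvAnyRun2 (ds : List Int) : Bool := (pvRuns ds).any (fun r => r.2 == 2)

def pvFnd (D V : PySem.Set Int) (m0 : Int) : Bool := (PySem.Set.diff D V).any (fun x => decide (x < m0))

def pvCat (D V : PySem.Set Int) (m0 : Int) : Nat :=
  if PySem.Set.contains V m0 then 3 else if PySem.Set.contains D m0 then 2 else 1

lemma pvParseDigits_length (cs : List Char) : ∀ (ds : List Int), pvParseDigits cs = some ds →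
    ds.length = cs.length := by
  induction cs with
  | nil => intro ds h; simp [pvParseDigits] at h; simp [← h]
  | cons c cs ih =>
    intro ds h
    simp only [pvParseDigits] at h
    cases hc : PySem.Int.ofChars? [c] with
    | none => rw [hc] at h; simp at h
    | some d =>
      rw [hc] at h
      cases hp : pvParseDigits cs with
      | none => rw [hp] at h; simp at h
      | some ds' =>
        rw [hp] at h
        simp at h
        subst h
        simp [ih ds' hp]

lemma pvZipAny (ds : List Int) : ∀ (d : Int),
    ((d :: ds).zip ds).any (fun p => decide (p.2 < p.1)) = !(pvND d ds) := by
  induction ds with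
  | nil => intro d; simp [pvND]
  | cons e es ih =>
    intro d
    simp only [List.zip_cons_cons, List.any_cons, pvND, ih e, Bool.not_and]
    congr 1
    by_cases h : d ≤ e <;> simp [h] <;> omega

lemma pvParse_nonneg (c : Char) (h : ((32 ≤ c.toNat && c.toNat ≤ 126) || c.toNat == 9 || c.toNat == 10 || c.toNat == 13) = true) (d : Int)
    (hp : PySem.Int.ofChars? [c] = some d) : 0 ≤ d := by
  have h127 : c.toNat < 127 := by
    simp only [Bool.or_eq_true, Bool.and_eq_true, decide_eq_true_eq, beq_iff_eq] at h
    omega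
  have key : (List.range 127).all
      (fun n => match PySem.Int.ofChars? [Char.ofNat n] with
        | none => true
        | some d => decide (0 ≤ d)) = true := by decide
  have hk := List.all_eq_true.mp key c.toNat (List.mem_range.mpr h127)
  rw [Char.ofNat_toNat] at hk
  rw [hp] at hk
  exact of_decide_eq_true hk

lemma pvTakeRun_eq (h : Int) : ∀ (rs : List Int) (n : Nat),
    pvTakeRun h n rs = (n + pvLead h rs, rs.dropWhile (fun x => x == h)) := by
  intro rs
  induction rs with
  | nil => intro n; simp [pvTakeRun, pvLead]
  | cons r rs ih =>
    intro n
    by_cases hr : r = h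
    · subst hr
      rw [pvTakeRun, if_pos rfl, ih]
      have h2 : pvLead r (r :: rs) = 1 + pvLead r rs := by
        simp [pvLead, List.takeWhile_cons]
        omega
      have h3 : (r :: rs).dropWhile (fun x => x == r) = rs.dropWhile (fun x => x == r) := by
        simp [List.dropWhile_cons]
      rw [h2, h3]
      congr 1
      omega
    · have hb : (r == h) = false := by simp [hr]
      simp [pvTakeRun, if_neg hr, pvLead, List.takeWhile_cons, List.dropWhile_cons, hb]

lemma pvRuns_cons (d : Int) (ds : List Int) :
    pvRuns (d :: ds) = (d, 1 + pvLead d ds) :: pvRuns (ds.dropWhile (fun x => x == d)) := by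
  rw [pvRuns]
  rw [pvTakeRun_eq]

lemma pvT_B (ds : List Int) : ∀ (found : Bool) (cat : Nat) (v : Int), 1 ≤ cat →
    pvT ds found cat v =
      (pvND v ds && (found || decide (cat + pvLead v ds = 2) || pvAnyRun2 (ds.dropWhile (fun x => x == v)))) := by
  induction ds with
  | nil =>
    intro found cat v _
    simp [pvT, pvND, pvLead, pvAnyRun2, pvRuns]
  | cons d ds ih =>
    intro found cat v hcat
    by_cases hd : d = v
    · subst hd
      have h1 : pvND d (d :: ds) = pvND d ds := by simp [pvND]
      have h2 : pvLead d (d :: ds) = 1 + pvLead d ds := by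
        simp [pvLead, List.takeWhile_cons]; omega
      have h3 : (d :: ds).dropWhile (fun x => x == d) = ds.dropWhile (fun x => x == d) := by
        simp [List.dropWhile_cons]
      rw [show pvT (d :: ds) found cat d = pvT ds found (min (cat + 1) 3) d from by simp [pvT]]
      rw [ih found (min (cat + 1) 3) d (by omega), h1, h2, h3]
      have h4 : decide (min (cat + 1) 3 + pvLead d ds = 2) = decide (cat + (1 + pvLead d ds) = 2) :=
        decide_eq_decide.mpr (by omega)
      rw [h4]
    · by_cases hlt : d < v
      · have : pvND v (d :: ds) = false := by simp [pvND]; omega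
        simp [pvT, if_neg hd, if_pos hlt, this]
      · have hvd : v ≤ d := by omega
        have hnd : pvND v (d :: ds) = pvND d ds := by simp [pvND, hvd]
        have hlead : pvLead v (d :: ds) = 0 := by simp [pvLead, List.takeWhile_cons, hd]
        have hdrop : (d :: ds).dropWhile (fun x => x == v) = d :: ds := by
          simp [List.dropWhile_cons, hd]
        have hrun : pvAnyRun2 (d :: ds) =
            (decide (1 + pvLead d ds = 2) || pvAnyRun2 (ds.dropWhile (fun x => x == d))) := by
          rw [pvAnyRun2, pvRuns_cons]
          simp only [List.any_cons, pvAnyRun2]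
          by_cases h : 1 + pvLead d ds = 2 <;> simp [h]
        rw [show pvT (d :: ds) found cat v = pvT ds (found || decide (cat = 2)) 1 d from by
          simp [pvT, if_neg hd, if_neg hlt]]
        rw [ih _ 1 d (by omega), hnd, hlead, hdrop, hrun]
        congr 1
        simp only [Nat.add_zero]
        cases found <;> simp [Bool.or_assoc, Bool.or_comm, Bool.or_left_comm]

lemma pvFnd_iff (D V : PySem.Set Int) (m0 : Int) :
    pvFnd D V m0 = true ↔ ∃ x ∈ D, x ∉ V ∧ x < m0 := by
  simp only [pvFnd, PySem.Set.diff, List.any_eq_true, List.mem_filter, Bool.not_eq_true',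
    ← Bool.not_eq_true, List.contains_iff_mem, decide_eq_true_eq, PySem.Set.contains]
  tauto

lemma pvCat_two_iff (D V : PySem.Set Int) (m0 : Int) :
    pvCat D V m0 = 2 ↔ (m0 ∈ D ∧ m0 ∉ V) := by
  simp only [pvCat, PySem.Set.contains]
  by_cases hv : m0 ∈ V
  · simp [List.contains_iff_mem.mpr hv, hv]
  · by_cases hd : m0 ∈ D
    · simp [hd, hv, List.contains_iff_mem, hv]
    · simp [hd, hv, List.contains_iff_mem]

lemma pvDiff_base (D V : PySem.Set Int) (m0 : Int) (hDle : ∀ x ∈ D, x ≤ m0) :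
    (!(PySem.Set.diff D V).isEmpty) = (pvFnd D V m0 || decide (pvCat D V m0 = 2)) := by
  rw [Bool.eq_iff_iff]
  simp only [Bool.not_eq_true', ← Bool.not_eq_true, Bool.or_eq_true, decide_eq_true_eq,
    pvFnd_iff, pvCat_two_iff]
  have hmem : ∀ x : Int, x ∈ PySem.Set.diff D V ↔ (x ∈ D ∧ x ∉ V) := by
    intro x
    simp [PySem.Set.diff, List.mem_filter, PySem.Set.contains, List.contains_iff_mem]
  constructor
  · intro h
    obtain ⟨x, hx⟩ := List.isEmpty_eq_false_iff_exists_mem.mp (Bool.not_eq_true _ ▸ h)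
    obtain ⟨hxD, hxV⟩ := (hmem x).mp hx
    rcases lt_or_eq_of_le (hDle x hxD) with hlt | heq
    · exact Or.inl ⟨x, hxD, hxV, hlt⟩
    · subst heq; exact Or.inr ⟨hxD, hxV⟩
  · intro h
    rw [Bool.not_eq_true]
    apply List.isEmpty_eq_false_iff_exists_mem.mpr
    rcases h with ⟨x, hxD, hxV, _⟩ | ⟨hD, hV⟩
    · exact ⟨x, (hmem x).mpr ⟨hxD, hxV⟩⟩
    · exact ⟨m0, (hmem m0).mpr ⟨hD, hV⟩⟩

lemma pvFnd_gt (D V : PySem.Set Int) (m0 d : Int) (hDle : ∀ x ∈ D, x ≤ m0) (hlt : m0 < d) :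
    pvFnd D V d = (pvFnd D V m0 || decide (pvCat D V m0 = 2)) := by
  rw [Bool.eq_iff_iff]
  simp only [Bool.or_eq_true, decide_eq_true_eq, pvFnd_iff, pvCat_two_iff]
  constructor
  · rintro ⟨x, hxD, hxV, _⟩
    rcases lt_or_eq_of_le (hDle x hxD) with h | h
    · exact Or.inl ⟨x, hxD, hxV, h⟩
    · subst h; exact Or.inr ⟨hxD, hxV⟩
  · rintro (⟨x, hxD, hxV, hx⟩ | ⟨hD, hV⟩)
    · exact ⟨x, hxD, hxV, by omega⟩
    · exact ⟨m0, hD, hV, hlt⟩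

lemma pvCat_gt (D V : PySem.Set Int) (m0 d : Int) (hDle : ∀ x ∈ D, x ≤ m0)
    (hVD : ∀ x ∈ V, x ∈ D) (hlt : m0 < d) : pvCat D V d = 1 := by
  have hD : d ∉ D := fun h => by have := hDle d h; omega
  have hV : d ∉ V := fun h => hD (hVD d h)
  simp [pvCat, PySem.Set.contains, List.contains_iff_mem, hD, hV]

lemma pvSetAdd_notMem (D : PySem.Set Int) (x : Int) (h : x ∉ D) :
    PySem.Set.add D x = D ++ [x] := by
  simp [PySem.Set.add, PySem.Set.contains, List.contains_iff_mem, h]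

lemma pvSetAdd_mem (D : PySem.Set Int) (x : Int) (h : x ∈ D) :
    PySem.Set.add D x = D := by
  simp [PySem.Set.add, PySem.Set.contains, List.contains_iff_mem, h]

lemma pvFnd_addD (D V : PySem.Set Int) (m0 : Int) :
    pvFnd (D ++ [m0]) V m0 = pvFnd D V m0 := by
  rw [Bool.eq_iff_iff]
  simp only [pvFnd_iff, List.mem_append, List.mem_singleton]
  constructor
  · rintro ⟨x, hx | hx, hxV, hlt⟩
    · exact ⟨x, hx, hxV, hlt⟩
    · omega
  · rintro ⟨x, hx, hxV, hlt⟩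
    exact ⟨x, Or.inl hx, hxV, hlt⟩

lemma pvCat_addD (D V : PySem.Set Int) (m0 : Int) (hV : m0 ∉ V) :
    pvCat (D ++ [m0]) V m0 = 2 := by
  simp [pvCat, PySem.Set.contains, List.contains_iff_mem, hV]

lemma pvFnd_addV (D V : PySem.Set Int) (m0 : Int) :
    pvFnd D (V ++ [m0]) m0 = pvFnd D V m0 := by
  rw [Bool.eq_iff_iff]
  simp only [pvFnd_iff, List.mem_append, List.mem_singleton]
  constructor
  · rintro ⟨x, hx, hxV, hlt⟩
    exact ⟨x, hx, fun h => hxV (Or.inl h), hlt⟩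
  · rintro ⟨x, hx, hxV, hlt⟩
    exact ⟨x, hx, by rintro (h | h); exact hxV h; omega, hlt⟩

lemma pvCat_addV (D V : PySem.Set Int) (m0 : Int) :
    pvCat D (V ++ [m0]) m0 = 3 := by
  simp [pvCat, PySem.Set.contains, List.contains_iff_mem]

lemma pvDLoop_T (ds : List Int) : ∀ (D V : PySem.Set Int) (m0 m1 : Int),
    0 ≤ m0 → m1 ≤ m0 →
    (∀ x ∈ V, x ∈ D) → (∀ x ∈ D, x ≤ m0) → (m0 ∈ D ↔ m1 = m0) →
    pvDLoop ds D V m0 m1 = pvT ds (pvFnd D V m0) (pvCat D V m0) m0 := by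
  induction ds with
  | nil =>
    intro D V m0 m1 h0 h1 hVD hDle hD2
    exact pvDiff_base D V m0 hDle
  | cons d ds ih =>
    intro D V m0 m1 h0 h1 hVD hDle hD2
    by_cases hd : d = m0
    · subst hd
      by_cases hm : d = m1
      · -- current run already had length ≥ 2: void it
        have hm1 : m1 = d := hm.symm
        have hdD : d ∈ D := hD2.mpr hm1
        rw [show pvDLoop (d :: ds) D V d m1 = pvDLoop ds D (PySem.Set.add V d) d d from by
              simp [pvDLoop, hm]]
        rw [show pvT (d :: ds) (pvFnd D V d) (pvCat D V d) d
              = pvT ds (pvFnd D V d) (min (pvCat D V d + 1) 3) d from by simp [pvT]]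
        by_cases hdV : d ∈ V
        · rw [pvSetAdd_mem V d hdV]
          have hcat : pvCat D V d = 3 := by
            simp [pvCat, PySem.Set.contains, List.contains_iff_mem, hdV]
          rw [ih D V d d h0 le_rfl hVD hDle (by simp [hdD]), hcat]
          norm_num
        · rw [pvSetAdd_notMem V d hdV]
          have hcat : pvCat D V d = 2 := pvCat_two_iff D V d |>.mpr ⟨hdD, hdV⟩
          rw [ih D (V ++ [d]) d d h0 le_rfl
                (by intro x hx; rcases List.mem_append.mp hx with h | h
                    · exact hVD x h
                    · simp at h; subst h; exact hdD)
                hDle (by simp [hdD]),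
              pvFnd_addV, pvCat_addV, hcat]
          norm_num
      · -- a fresh double
        have hdD : d ∉ D := fun h => hm ((hD2.mp h).symm)
        have hdV : d ∉ V := fun h => hdD (hVD d h)
        rw [show pvDLoop (d :: ds) D V d m1 = pvDLoop ds (PySem.Set.add D d) V d d from by
              simp [pvDLoop, hm]]
        rw [show pvT (d :: ds) (pvFnd D V d) (pvCat D V d) d
              = pvT ds (pvFnd D V d) (min (pvCat D V d + 1) 3) d from by simp [pvT]]
        have hcat : pvCat D V d = 1 := by
          simp [pvCat, PySem.Set.contains, List.contains_iff_mem, hdD, hdV]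
        rw [pvSetAdd_notMem D d hdD]
        rw [ih (D ++ [d]) V d d h0 le_rfl
              (fun x hx => List.mem_append.mpr (Or.inl (hVD x hx)))
              (by intro x hx; rcases List.mem_append.mp hx with h | h
                  · exact hDle x h
                  · simp at h; omega)
              (by simp)]
        rw [pvFnd_addD, pvCat_addD D V d hdV, hcat]
        norm_num
    · by_cases hlt : d < m0
      · rw [show pvDLoop (d :: ds) D V m0 m1 = false from by simp [pvDLoop, hd, hlt]]
        rw [show pvT (d :: ds) (pvFnd D V m0) (pvCat D V m0) m0 = false from by
              simp [pvT, hd, hlt]]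
      · have hgt : m0 < d := by omega
        rw [show pvDLoop (d :: ds) D V m0 m1 = pvDLoop ds D V d m0 from by
              simp [pvDLoop, hd, hlt]]
        rw [show pvT (d :: ds) (pvFnd D V m0) (pvCat D V m0) m0
              = pvT ds (pvFnd D V m0 || decide (pvCat D V m0 = 2)) 1 d from by
              simp [pvT, hd, hlt]]
        rw [ih D V d m0 (by omega) (by omega) hVD
              (fun x hx => by have := hDle x hx; omega)
              (by constructor
                  · intro h; have := hDle d h; omega
                  · intro h; omega)]
        rw [pvFnd_gt D V m0 d hDle hgt, pvCat_gt D V m0 d hDle hVD hgt]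

lemma pvALoop_parse (cs : List Char) : ∀ (D V : PySem.Set Int) (m0 m1 : Int),
    pvALoop cs D V m0 m1 =
      match pvParseDigits cs with
      | none => false
      | some ds => pvDLoop ds D V m0 m1 := by
  induction cs with
  | nil => intro D V m0 m1; simp [pvALoop, pvParseDigits, pvDLoop]
  | cons c cs ih =>
    intro D V m0 m1
    simp only [pvALoop, pvParseDigits]
    cases hc : PySem.Int.ofChars? [c] with
    | none => simp
    | some d =>
      cases hp : pvParseDigits cs with
      | none =>
        by_cases hd : d = m0
        · by_cases hm : d = m1 <;> simp [hd, hm, ih, hp]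
        · by_cases hlt : d < m0 <;> simp [hd, hlt, ih, hp]
      | some ds =>
        by_cases hd : d = m0
        · by_cases hm : d = m1 <;> simp [hd, hm, ih, hp, pvDLoop]
        · by_cases hlt : d < m0 <;> simp [hd, hlt, ih, hp, pvDLoop]

lemma pvParseDigits_cons_elim (c : Char) (cs : List Char) (ds : List Int)
    (h : pvParseDigits (c :: cs) = some ds) :
    ∃ d ds', ds = d :: ds' ∧ PySem.Int.ofChars? [c] = some d ∧ pvParseDigits cs = some ds' := by
  simp only [pvParseDigits] at h
  cases hc : PySem.Int.ofChars? [c] with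
  | none => rw [hc] at h; simp at h
  | some d =>
    rw [hc] at h
    cases hp : pvParseDigits cs with
    | none => rw [hp] at h; simp at h
    | some ds' =>
      rw [hp] at h
      simp at h
      exact ⟨d, ds', h.symm, rfl, rfl⟩

-- ===== VERDICT (by name: the statement is the Claim_ definition above) =====
theorem check_password_is_valid_spec : Claim_equal_check_password_is_valid := by
  intro password hdom
  unfold Spec_check_password_is_valid check_password_is_valid check_password_is_valid_alt
  by_cases hlen : PySem.Str.len password ≠ 6
  · rw [if_pos hlen, if_pos hlen]
  · simp only [hlen, if_false]
    rw [pvALoop_parse]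
    cases hp : pvParseDigits password.toList with
    | none => simp
    | some digits =>
      simp only []
      have hlen6 : password.toList.length = 6 := by
        rw [not_not] at hlen
        have := PySem.Str.len_eq password
        rw [hlen] at this
        exact_mod_cast this.symm
      have hdl : digits.length = 6 := by
        rw [pvParseDigits_length password.toList digits hp, hlen6]
      obtain ⟨c, cs, hcs⟩ : ∃ c cs, password.toList = c :: cs := by
        cases h : password.toList with
        | nil => rw [h] at hlen6; simp at hlen6
        | cons c cs => exact ⟨c, cs, rfl⟩
      rw [hcs] at hp
      obtain ⟨d1, rest, rfl, hc1, _⟩ := pvParseDigits_cons_elim c cs digits hp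
      have hdomc : pvDomChar c = true := by
        have := hdom
        unfold Dom_check_password_is_valid pvDomStr at this
        rw [hcs] at this
        exact (List.all_eq_true.mp this c (List.mem_cons_self ..))
      have hd1 : 0 ≤ d1 := pvParse_nonneg c (by simpa [pvDomChar] using hdomc) d1 hc1
      -- A's side reduces to the streaming specification
      have hA : pvDLoop (d1 :: rest) PySem.Set.empty PySem.Set.empty (-1) (-1)
          = pvT rest false 1 d1 := by
        rw [show pvDLoop (d1 :: rest) PySem.Set.empty PySem.Set.empty (-1) (-1)
              = pvDLoop rest PySem.Set.empty PySem.Set.empty d1 (-1) from by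
          simp only [pvDLoop]
          rw [if_neg (by omega), if_neg (by omega)]]
        rw [pvDLoop_T rest PySem.Set.empty PySem.Set.empty d1 (-1) hd1 (by omega)
              (by intro x hx; simp [PySem.Set.empty] at hx)
              (by intro x hx; simp [PySem.Set.empty] at hx)
              (by constructor
                  · intro h; simp [PySem.Set.empty] at h
                  · intro h; omega)]
        rfl
      rw [hA]
      -- B's side also reduces to the streaming specification
      rw [List.tail_cons, pvZipAny rest d1, pvT_B rest false 1 d1 le_rfl]
      cases hnd : pvND d1 rest with
      | false => simp
      | true =>
        simp only [Bool.not_true, Bool.true_and, Bool.false_or]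
        rw [if_neg (by simp)]
        rw [pvRuns_cons]
        simp only [List.any_cons, pvAnyRun2]
        by_cases h2 : 1 + pvLead d1 rest = 2 <;> simp [h2]
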